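-- pv_equiv track=rewrite | github.com/susheelkv/karnataka-panchanga | panchanga/src/parse.py | _deduplicate_festivals
-- ===== SOURCE A (Python) =====
-- def _deduplicate_festivals(festivals: list[str]) -> list[str]:
--     """Remove duplicates and suppress generic names when specific ones exist."""
--     seen: set[str] = set()
--     result: list[str] = []
--     # Suppress generic if a more specific variant is present
--     suppress = set()
--     for f in festivals:
--         for other in festivals:
--             if other != f and other.startswith(f) and len(other) > len(f):
--                 suppress.add(f)
--     for f in festivals:
--         if f not in seen and f not in suppress:
--             seen.add(f)
--             result.append(f)
--     return result
-- ===== SOURCE B (Python) =====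
-- def _deduplicate_festivals(festivals: list[str]) -> list[str]:
--     """Remove duplicates and suppress generic names when specific ones exist."""
--     prefixes: set[str] = set()
--     for s in festivals:
--         for k in range(len(s)):
--             prefixes.add(s[:k])
--     return [f for f in dict.fromkeys(festivals) if f not in prefixes]
-- ===== Notes on version B (the rewrite author's own statement) =====
-- stated objective: faster
-- what changed: Replaces A's O(n^2) pairwise startswith scan by building one hash set of all proper prefixes of every name, then returns the filtered first occurrences via dict.fromkeys instead of A's seen-set loop.
import Mathlib
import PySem

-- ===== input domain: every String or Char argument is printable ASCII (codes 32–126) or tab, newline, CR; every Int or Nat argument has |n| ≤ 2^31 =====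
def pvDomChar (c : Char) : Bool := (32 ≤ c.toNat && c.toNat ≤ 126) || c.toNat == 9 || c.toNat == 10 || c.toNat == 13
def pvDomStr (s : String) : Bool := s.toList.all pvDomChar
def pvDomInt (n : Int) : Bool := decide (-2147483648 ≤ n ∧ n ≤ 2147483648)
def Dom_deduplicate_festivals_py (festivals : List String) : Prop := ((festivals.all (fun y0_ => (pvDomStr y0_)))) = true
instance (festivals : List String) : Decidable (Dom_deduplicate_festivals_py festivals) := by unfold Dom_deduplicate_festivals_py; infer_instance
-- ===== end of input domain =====

-- B replaces A's quadratic pairwise prefix scan by one hash-set of all proper prefixes of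
-- every name, then dedups-and-filters via dict.fromkeys (objective: faster, measured).

-- ===== PORT A =====
def deduplicate_festivals_py (festivals : List String) : List String :=
  -- suppress = set(); for f in festivals: for other in festivals: if …: suppress.add(f)
  let suppress : PySem.Set String :=
    festivals.foldl (fun sup f =>
      festivals.foldl (fun sup other =>
        if other ≠ f ∧ PySem.Str.startswith other f = true ∧ PySem.Str.len other > PySem.Str.len f
        then PySem.Set.add sup f else sup) sup) PySem.Set.empty
  -- seen = set(); result = []; for f in festivals: if f not in seen and f not in suppress: …
  (festivals.foldl (fun (st : PySem.Set String × List String) f =>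
      if f ∉ st.1 ∧ f ∉ suppress then (PySem.Set.add st.1 f, st.2 ++ [f]) else st)
    (PySem.Set.empty, [])).2

-- ===== PORT B =====
def deduplicate_festivals_py_alt (festivals : List String) : List String :=
  -- prefixes = set(); for s in festivals: for k in range(len(s)): prefixes.add(s[:k])
  let prefixes : PySem.Set String :=
    festivals.foldl (fun p s =>
      (PySem.List.pyRange 0 (PySem.Str.len s) 1).foldl
        (fun p k => PySem.Set.add p (PySem.Str.slice s none (some k))) p) PySem.Set.empty
  -- [f for f in dict.fromkeys(festivals) if f not in prefixes]
  (PySem.List.dedup festivals).filter (fun f => decide (f ∉ prefixes))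

-- ===== PRECONDITION & SPEC =====
def Spec_deduplicate_festivals_py (festivals : List String) (out : List String) : Prop := out = deduplicate_festivals_py_alt festivals
instance (festivals : List String) (out : List String) : Decidable (Spec_deduplicate_festivals_py festivals out) := by unfold Spec_deduplicate_festivals_py; infer_instance

-- ===== CLAIM (what is proved, stated in full; the proofs are below) =====
def Claim_equal_deduplicate_festivals_py : Prop := ∀ (festivals : List String), Dom_deduplicate_festivals_py festivals → Spec_deduplicate_festivals_py festivals (deduplicate_festivals_py festivals)

-- ===== LEMMAS AND PROOFS =====

-- membership through a fold whose step adds elements characterised by Q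
theorem pv_mem_foldl_of_step {α β : Type} (x : α) (step : List α → β → List α) (Q : β → Prop)
    (h : ∀ s y, x ∈ step s y ↔ x ∈ s ∨ Q y) :
    ∀ (l : List β) (s0 : List α), x ∈ l.foldl step s0 ↔ x ∈ s0 ∨ ∃ y ∈ l, Q y := by
  intro l
  induction l with
  | nil => simp
  | cons y l ih =>
    intro s0
    simp only [List.foldl_cons, ih (step s0 y), h s0 y, List.mem_cons]
    constructor
    · rintro ((hs | hq) | ⟨z, hz, hQ⟩)
      · exact Or.inl hs
      · exact Or.inr ⟨y, Or.inl rfl, hq⟩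
      · exact Or.inr ⟨z, Or.inr hz, hQ⟩
    · rintro (hs | ⟨z, (rfl | hz), hQ⟩)
      · exact Or.inl (Or.inl hs)
      · exact Or.inl (Or.inr hQ)
      · exact Or.inr ⟨z, hz, hQ⟩

-- the strict-prefix condition both programs test, stated on one candidate pair
def pvStrict (x s : String) : Prop := x.toList <+: s.toList ∧ x.toList.length < s.toList.length

-- A's inner condition is exactly pvStrict
theorem pv_condA_iff (f other : String) :
    (other ≠ f ∧ PySem.Str.startswith other f = true ∧ PySem.Str.len other > PySem.Str.len f)
      ↔ pvStrict f other := by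
  simp only [pvStrict, PySem.Str.startswith_eq, PySem.Chars.startswith_iff, PySem.Str.len_eq]
  constructor
  · rintro ⟨_, hp, hl⟩; exact ⟨hp, by exact_mod_cast hl⟩
  · rintro ⟨hp, hl⟩
    refine ⟨?_, hp, by exact_mod_cast hl⟩
    intro he; subst he; omega

-- membership in A's suppress set
theorem pv_mem_suppress (festivals : List String) (x : String) :
    x ∈ festivals.foldl (fun sup f =>
        festivals.foldl (fun sup other =>
          if other ≠ f ∧ PySem.Str.startswith other f = true ∧ PySem.Str.len other > PySem.Str.len f
          then PySem.Set.add sup f else sup) sup) PySem.Set.empty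
      ↔ ∃ f ∈ festivals, x = f ∧ ∃ other ∈ festivals, pvStrict f other := by
  have hstep : ∀ (s : List String) (f : String),
      x ∈ festivals.foldl (fun sup other =>
          if other ≠ f ∧ PySem.Str.startswith other f = true ∧ PySem.Str.len other > PySem.Str.len f
          then PySem.Set.add sup f else sup) s
        ↔ x ∈ s ∨ (x = f ∧ ∃ other ∈ festivals, pvStrict f other) := by
    intro s f
    have hin : ∀ (s' : List String) (other : String),
        x ∈ (if other ≠ f ∧ PySem.Str.startswith other f = true ∧ PySem.Str.len other > PySem.Str.len f
              then PySem.Set.add s' f else s')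
          ↔ x ∈ s' ∨ (pvStrict f other ∧ x = f) := by
      intro s' other
      by_cases hc : other ≠ f ∧ PySem.Str.startswith other f = true ∧ PySem.Str.len other > PySem.Str.len f
      · rw [if_pos hc, PySem.Set.mem_add]
        have := (pv_condA_iff f other).mp hc
        tauto
      · rw [if_neg hc]
        have := fun hs => hc ((pv_condA_iff f other).mpr hs)
        tauto
    rw [pv_mem_foldl_of_step x _ _ (hin) festivals s]
    constructor
    · rintro (hs | ⟨o, ho, hst, rfl⟩); · exact Or.inl hs
      · exact Or.inr ⟨rfl, o, ho, hst⟩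
    · rintro (hs | ⟨rfl, o, ho, hst⟩); · exact Or.inl hs
      · exact Or.inr ⟨o, ho, hst, rfl⟩
  rw [pv_mem_foldl_of_step x _ _ (fun s f => hstep s f) festivals PySem.Set.empty]
  simp [PySem.Set.empty]

-- membership in B's prefixes set
theorem pv_mem_prefixes (festivals : List String) (x : String) :
    x ∈ festivals.foldl (fun p s =>
        (PySem.List.pyRange 0 (PySem.Str.len s) 1).foldl
          (fun p k => PySem.Set.add p (PySem.Str.slice s none (some k))) p) PySem.Set.empty
      ↔ ∃ s ∈ festivals, pvStrict x s := by
  have hstep : ∀ (p : List String) (s : String),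
      x ∈ (PySem.List.pyRange 0 (PySem.Str.len s) 1).foldl
          (fun p k => PySem.Set.add p (PySem.Str.slice s none (some k))) p
        ↔ x ∈ p ∨ pvStrict x s := by
    intro p s
    have hin : ∀ (p' : List String) (k : Int),
        x ∈ PySem.Set.add p' (PySem.Str.slice s none (some k)) ↔ x ∈ p' ∨ x = PySem.Str.slice s none (some k) :=
      fun p' k => PySem.Set.mem_add _ _ _
    rw [pv_mem_foldl_of_step x _ _ hin _ p]
    refine or_congr Iff.rfl ?_
    constructor
    · rintro ⟨k, hk, rfl⟩
      rw [PySem.List.mem_pyRange_one] at hk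
      obtain ⟨hk0, hkl⟩ := hk
      rw [PySem.Str.len_eq] at hkl
      constructor
      · apply (List.prefix_iff_eq_take).mpr
        rw [PySem.Str.toList_slice, PySem.Chars.slice_eq_listSlice, PySem.List.slice_to _ hk0,
            List.length_take]
        congr 1
        omega
      · rw [PySem.Str.toList_slice, PySem.Chars.slice_eq_listSlice, PySem.List.slice_to _ hk0,
            List.length_take]
        omega
    · rintro ⟨hp, hl⟩
      refine ⟨(x.toList.length : Int), ?_, ?_⟩
      · rw [PySem.List.mem_pyRange_one, PySem.Str.len_eq]; omega
      · have hx : x.toList = s.toList.take x.toList.length := List.prefix_iff_eq_take.mp hp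
        apply String.toList_injective
        rw [PySem.Str.toList_slice, PySem.Chars.slice_eq_listSlice, PySem.List.slice_to _ (by omega)]
        simpa using hx
  rw [pv_mem_foldl_of_step x _ _ hstep festivals PySem.Set.empty]
  simp [PySem.Set.empty]

-- first-occurrence pass of A's second loop, as a recursion
def pvPass (sup : PySem.Set String) : List String → PySem.Set String → List String
  | [], _ => []
  | f :: l, s => if f ∉ s ∧ f ∉ sup then f :: pvPass sup l (PySem.Set.add s f) else pvPass sup l s

theorem pv_foldl_pass (sup : PySem.Set String) :
    ∀ (l : List String) (s : PySem.Set String) (r : List String),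
      (l.foldl (fun (st : PySem.Set String × List String) f =>
          if f ∉ st.1 ∧ f ∉ sup then (PySem.Set.add st.1 f, st.2 ++ [f]) else st) (s, r)).2
        = r ++ pvPass sup l s := by
  intro l
  induction l with
  | nil => intro s r; simp [pvPass]
  | cons f l ih =>
    intro s r
    by_cases h : f ∉ s ∧ f ∉ sup
    · simp [pvPass, h, ih]
    · simp [pvPass, h, ih]

-- pvPass depends on the seen set only through membership of non-suppressed elements
theorem pv_pass_congr (sup : PySem.Set String) :
    ∀ (l : List String) (s s' : PySem.Set String),
      (∀ x, x ∉ sup → (x ∈ s ↔ x ∈ s')) → pvPass sup l s = pvPass sup l s' := by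
  intro l
  induction l with
  | nil => intro s s' _; rfl
  | cons f l ih =>
    intro s s' h
    by_cases hf : f ∉ sup
    · by_cases hs : f ∈ s
      · have hs' : f ∈ s' := (h f hf).mp hs
        simp [pvPass, hs, hs']
        exact ih s s' h
      · have hs' : f ∉ s' := fun hx => hs ((h f hf).mpr hx)
        simp [pvPass, hs, hs', hf]
        exact ih _ _ (by intro x hx; simp [List.mem_append, h x hx])
    · push Not at hf
      simp [pvPass, hf]
      exact ih s s' h

-- plain first-occurrence dedup relative to an already-seen set
def pvDedupRel : List String → PySem.Set String → List String
  | [], _ => []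
  | f :: l, s => if f ∈ s then pvDedupRel l s else f :: pvDedupRel l (PySem.Set.add s f)

theorem pv_pass_eq_filter (sup : PySem.Set String) :
    ∀ (l : List String) (s : PySem.Set String),
      pvPass sup l s = (pvDedupRel l s).filter (fun f => decide (f ∉ sup)) := by
  intro l
  induction l with
  | nil => intro s; rfl
  | cons f l ih =>
    intro s
    by_cases hs : f ∈ s
    · simp [pvPass, pvDedupRel, hs, ih]
    · by_cases hsup : f ∉ sup
      · simp [pvPass, pvDedupRel, hs, hsup, ih]
      · push Not at hsup
        have hcong : pvPass sup l (PySem.Set.add s f) = pvPass sup l s := by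
          apply pv_pass_congr
          intro x hx
          rw [PySem.Set.mem_add]
          constructor
          · rintro (h | rfl); · exact h
            · exact absurd hsup hx
          · exact Or.inl
        simp [pvPass, pvDedupRel, hs, hsup, ← hcong, ih]

theorem pv_dedupRel_update : ∀ (l : List String) (s : PySem.Set String),
    s ++ pvDedupRel l s = PySem.Set.update s l := by
  intro l
  induction l with
  | nil => intro s; simp [pvDedupRel, PySem.Set.update]
  | cons f l ih =>
    intro s
    by_cases hs : f ∈ s
    · have hadd : PySem.Set.add s f = s := by
        simp [PySem.Set.add, PySem.Set.contains, hs]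
      calc s ++ pvDedupRel (f :: l) s = s ++ pvDedupRel l s := by simp [pvDedupRel, hs]
        _ = PySem.Set.update s l := ih s
        _ = PySem.Set.update s (f :: l) := by simp [PySem.Set.update, hadd]
    · have hadd : PySem.Set.add s f = s ++ [f] := by
        simp [PySem.Set.add, PySem.Set.contains, hs]
      calc s ++ pvDedupRel (f :: l) s
          = (s ++ [f]) ++ pvDedupRel l (PySem.Set.add s f) := by simp [pvDedupRel, hs]
        _ = PySem.Set.add s f ++ pvDedupRel l (PySem.Set.add s f) := by rw [hadd]
        _ = PySem.Set.update (PySem.Set.add s f) l := ih _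
        _ = PySem.Set.update s (f :: l) := by simp [PySem.Set.update]

theorem pv_dedupRel_nil (l : List String) : pvDedupRel l PySem.Set.empty = PySem.List.dedup l := by
  have he : (PySem.Set.empty : PySem.Set String) = [] := rfl
  have h := pv_dedupRel_update l PySem.Set.empty
  rw [he, List.nil_append] at h
  rw [he, h, PySem.Set.update_nil_left, PySem.List.dedup_eq_ofList]

-- ===== VERDICT (by name: the statement is the Claim_ definition above) =====
theorem deduplicate_festivals_py_spec : Claim_equal_deduplicate_festivals_py := by
  intro festivals _
  unfold Spec_deduplicate_festivals_py deduplicate_festivals_py deduplicate_festivals_py_alt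
  rw [pv_foldl_pass, List.nil_append, pv_pass_eq_filter, pv_dedupRel_nil]
  apply List.filter_congr
  intro f hf
  have hfmem : f ∈ festivals := by
    rw [PySem.List.dedup_eq_ofList] at hf
    exact (PySem.Set.mem_ofList _ _).mp hf
  simp only [decide_eq_decide]
  rw [not_iff_not, pv_mem_suppress, pv_mem_prefixes]
  constructor
  · rintro ⟨g, _, rfl, other, ho, hst⟩; exact ⟨other, ho, hst⟩
  · rintro ⟨s, hs, hst⟩; exact ⟨f, hfmem, rfl, s, hs, hst⟩
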